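-- pv_equiv track=rewrite | github.com/antonioglp/pro-solutions | hulk_solution.py | diagonal_diff
-- ===== SOURCE A (Python) =====
-- def diagonal_diff(matrix):
--     '''
--     Calculate absolute difference between diagonals
--     :param1 n: array of number, same height and weight
--     :return: absolute difference
--     '''
--     last_m = len(matrix) - 1
--     first_m = 0
--     result = 0
--     for m in matrix:
--         result = (result + m[first_m]) - m[last_m]
--         first_m+=1
--         last_m-=1
--     ## return absolute value
--     return result if result > 0 else result * -1
-- ===== SOURCE B (Python) =====
-- def diagonal_diff(matrix):
--     # Two-pointer pass: pair row lo with row hi = n-1-lo and add both rows'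
--     # diagonal contributions at once; the middle row (lo == hi) contributes
--     # m[lo][lo] - m[lo][lo] = 0 and is skipped.
--     n = len(matrix)
--     lo, hi = 0, n - 1
--     d = 0
--     while lo < hi:
--         d += matrix[lo][lo] - matrix[lo][hi] + matrix[hi][hi] - matrix[hi][lo]
--         lo += 1
--         hi -= 1
--     return d if d > 0 else d * -1
-- ===== Notes on version B (the rewrite author's own statement) =====
-- stated objective: alternative
-- what changed: A walks all n rows once with two moving index counters and one running difference; B is a two-pointer loop that meets in the middle, pairing row lo with row n-1-lo and adding both rows' diagonal contributions per iteration (n/2 iterations), relying on the middle row's contribution being identically zero; Pre_ excludes exactly the inputs (rows too short for the diagonal indices) on which A raises IndexError.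
import Mathlib
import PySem

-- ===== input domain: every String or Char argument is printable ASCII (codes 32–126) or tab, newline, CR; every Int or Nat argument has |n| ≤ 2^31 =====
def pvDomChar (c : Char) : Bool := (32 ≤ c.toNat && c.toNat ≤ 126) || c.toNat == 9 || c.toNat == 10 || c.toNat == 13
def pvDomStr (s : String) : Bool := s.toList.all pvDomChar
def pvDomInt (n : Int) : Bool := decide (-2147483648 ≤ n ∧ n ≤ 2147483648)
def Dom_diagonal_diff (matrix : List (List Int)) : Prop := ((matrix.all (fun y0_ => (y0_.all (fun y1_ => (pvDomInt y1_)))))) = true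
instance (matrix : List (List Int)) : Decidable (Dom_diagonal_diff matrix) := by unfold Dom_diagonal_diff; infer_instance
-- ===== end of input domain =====

-- B replaces A's single full pass with moving counters by a two-pointer loop pairing row lo with row n-1-lo (the middle row contributes 0); same result (proved), not faster.

-- ===== PORT A =====
-- state (last_m, first_m, result); m[first_m] / m[last_m] via pyGetD (exact under Pre_, where all indices are in range)
def diagonal_diff (matrix : List (List Int)) : Int :=
  let st := matrix.foldl
    (fun (st : Int × Int × Int) m =>
      (st.1 - 1, st.2.1 + 1,
        (st.2.2 + PySem.List.pyGetD m st.2.1 0) - PySem.List.pyGetD m st.1 0))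
    ((matrix.length : Int) - 1, 0, 0)
  let result := st.2.2
  if result > 0 then result else result * -1

-- ===== PORT B =====
-- B's while loop: lo/hi two pointers, body adds both paired rows' diagonal contributions
def pvWhileB (matrix : List (List Int)) (lo hi d : Int) : Int :=
  if lo < hi then
    pvWhileB matrix (lo + 1) (hi - 1)
      (d + (PySem.List.pyGetD (PySem.List.pyGetD matrix lo []) lo 0
            - PySem.List.pyGetD (PySem.List.pyGetD matrix lo []) hi 0
            + PySem.List.pyGetD (PySem.List.pyGetD matrix hi []) hi 0
            - PySem.List.pyGetD (PySem.List.pyGetD matrix hi []) lo 0))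
  else d
termination_by (hi - lo).toNat
decreasing_by omega

def diagonal_diff_alt (matrix : List (List Int)) : Int :=
  let n : Int := matrix.length
  let d := pvWhileB matrix 0 (n - 1) 0
  if d > 0 then d else d * -1

-- ===== PRECONDITION & SPEC =====
-- Exactly the inputs where Python A returns: every row i is long enough for both diagonal indices i and n-1-i (else A raises IndexError).
def Pre_diagonal_diff (matrix : List (List Int)) : Prop :=
  ∀ i ∈ List.range matrix.length,
    i < (matrix.getD i []).length ∧ matrix.length - 1 - i < (matrix.getD i []).length
instance (matrix : List (List Int)) : Decidable (Pre_diagonal_diff matrix) := by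
  unfold Pre_diagonal_diff; infer_instance
def pvWitness_diagonal_diff : List (List Int) := [[1, 2], [3, 4]]

def Spec_diagonal_diff (matrix : List (List Int)) (out : Int) : Prop := out = diagonal_diff_alt matrix
instance (matrix : List (List Int)) (out : Int) : Decidable (Spec_diagonal_diff matrix out) := by unfold Spec_diagonal_diff; infer_instance

-- ===== CLAIM (what is proved, stated in full; the proofs are below) =====
def Claim_equal_diagonal_diff : Prop := ∀ (matrix : List (List Int)), Dom_diagonal_diff matrix → Pre_diagonal_diff matrix → Spec_diagonal_diff matrix (diagonal_diff matrix)

-- ===== LEMMAS AND PROOFS =====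

-- signed per-row diagonal contribution with respect to last index N = n-1
def pvG (matrix : List (List Int)) (N i : Int) : Int :=
  PySem.List.pyGetD (PySem.List.pyGetD matrix i []) i 0
  - PySem.List.pyGetD (PySem.List.pyGetD matrix i []) (N - i) 0

def pvSumD (matrix : List (List Int)) (N lo hi : Int) : Int :=
  ((PySem.List.pyRange lo (hi + 1) 1).map (pvG matrix N)).sum

-- common recursive form: the signed diagonal difference with moving indices
def pvGo : List (List Int) → Int → Int → Int
  | [], _, _ => 0
  | m :: ms, first, last =>
      (PySem.List.pyGetD m first 0 - PySem.List.pyGetD m last 0) + pvGo ms (first + 1) (last - 1)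

-- A's fold computes pvGo
theorem pvA_fold (rows : List (List Int)) :
    ∀ (last first result : Int),
      rows.foldl
        (fun (st : Int × Int × Int) m =>
          (st.1 - 1, st.2.1 + 1,
            (st.2.2 + PySem.List.pyGetD m st.2.1 0) - PySem.List.pyGetD m st.1 0))
        (last, first, result)
      = (last - rows.length, first + rows.length, result + pvGo rows first last) := by
  induction rows with
  | nil => intro last first result; simp [pvGo]
  | cons m ms ih =>
      intro last first result
      simp only [List.foldl_cons, ih, pvGo, List.length_cons]
      refine Prod.ext ?_ (Prod.ext ?_ ?_) <;> simp <;> ring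

-- the enumerate sum is pvGo
theorem pvEnum_go (xs : List (List Int)) :
    ∀ (s first last : Int),
      ((PySem.List.enumerate xs s).map
          (fun p => PySem.List.pyGetD p.2 (first + (p.1 - s)) 0
                    - PySem.List.pyGetD p.2 (last - (p.1 - s)) 0)).sum
      = pvGo xs first last := by
  induction xs with
  | nil => intro s first last; simp [PySem.List.enumerate_nil, pvGo]
  | cons m ms ih =>
      intro s first last
      rw [PySem.List.enumerate_cons]
      simp only [List.map_cons, List.sum_cons, pvGo]
      have harg1 : first + (s - s) = first := by ring
      have harg2 : last - (s - s) = last := by ring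
      rw [harg1, harg2]
      congr 1
      have hfun : (fun p : Int × List Int =>
            PySem.List.pyGetD p.2 (first + (p.1 - s)) 0
            - PySem.List.pyGetD p.2 (last - (p.1 - s)) 0)
          = (fun p : Int × List Int =>
            PySem.List.pyGetD p.2 ((first + 1) + (p.1 - (s + 1))) 0
            - PySem.List.pyGetD p.2 ((last - 1) - (p.1 - (s + 1))) 0) := by
        funext p
        have e1 : first + (p.1 - s) = (first + 1) + (p.1 - (s + 1)) := by ring
        have e2 : last - (p.1 - s) = (last - 1) - (p.1 - (s + 1)) := by ring
        rw [e1, e2]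
      rw [hfun, ih]

-- A's accumulated result is the pvG-sum over all rows
theorem pvA_result (matrix : List (List Int)) :
    (matrix.foldl
        (fun (st : Int × Int × Int) m =>
          (st.1 - 1, st.2.1 + 1,
            (st.2.2 + PySem.List.pyGetD m st.2.1 0) - PySem.List.pyGetD m st.1 0))
        ((matrix.length : Int) - 1, 0, 0)).2.2
    = pvSumD matrix ((matrix.length : Int) - 1) 0 ((matrix.length : Int) - 1) := by
  rw [pvA_fold]
  show 0 + pvGo matrix 0 ((matrix.length : Int) - 1)
      = pvSumD matrix ((matrix.length : Int) - 1) 0 ((matrix.length : Int) - 1)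
  rw [zero_add, ← pvEnum_go matrix 0 0 ((matrix.length : Int) - 1)]
  unfold pvSumD
  have hrange : ((matrix.length : Int) - 1) + 1 = (matrix.length : Int) := by ring
  rw [hrange]
  rw [PySem.List.enumerate_eq_map_pyRange (xs := matrix) (d := []), List.map_map]
  have hfun : ((fun p : Int × List Int =>
        PySem.List.pyGetD p.2 (0 + (p.1 - 0)) 0
        - PySem.List.pyGetD p.2 (((matrix.length : Int) - 1) - (p.1 - 0)) 0)
      ∘ (fun j => (j, PySem.List.pyGetD matrix j [])))
      = pvG matrix ((matrix.length : Int) - 1) := by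
    funext j
    unfold pvG
    simp only [Function.comp]
    have e1 : 0 + (j - 0) = j := by ring
    have e2 : ((matrix.length : Int) - 1) - (j - 0) = ((matrix.length : Int) - 1) - j := by ring
    rw [e1, e2]
  rw [hfun]
  simp

-- the middle row's contribution is zero
theorem pvG_mid (matrix : List (List Int)) (N i : Int) (h : N - i = i) :
    pvG matrix N i = 0 := by
  unfold pvG; rw [h]; ring

-- splitting the sum at both ends
theorem pvSumD_split (matrix : List (List Int)) (N lo hi : Int) (h : lo < hi) :
    pvSumD matrix N lo hi
      = pvG matrix N lo + pvSumD matrix N (lo + 1) (hi - 1) + pvG matrix N hi := by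
  unfold pvSumD
  rw [PySem.List.pyRange_one_cons (by omega : lo < hi + 1)]
  have hmid : (hi - 1) + 1 = hi := by ring
  rw [hmid]
  rw [PySem.List.pyRange_one_succ_right (by omega : lo + 1 ≤ hi)]
  simp [List.map_append]
  ring

-- B's while loop computes the pvG-sum, given the pairing invariant lo + hi = N
theorem pvWhileB_sum (matrix : List (List Int)) (N : Int) :
    ∀ (k : Nat) (lo hi d : Int), (hi - lo).toNat = k → lo + hi = N →
      pvWhileB matrix lo hi d = d + pvSumD matrix N lo hi := by
  intro k
  induction k using Nat.strong_induction_on with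
  | _ k ih =>
    intro lo hi d hk hN
    by_cases h : lo < hi
    · rw [pvWhileB, if_pos h]
      rw [ih ((hi - 1) - (lo + 1)).toNat (by omega) (lo + 1) (hi - 1)
            _ rfl (by omega)]
      rw [pvSumD_split matrix N lo hi h]
      unfold pvG
      have h1 : N - lo = hi := by omega
      have h2 : N - hi = lo := by omega
      rw [h1, h2]
      ring
    · rw [pvWhileB, if_neg h]
      by_cases he : lo = hi
      · subst he
        unfold pvSumD
        rw [PySem.List.pyRange_one_cons (by omega : lo < lo + 1),
            PySem.List.pyRange_one_eq_nil (by omega : lo + 1 ≤ lo + 1)]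
        simp [pvG_mid matrix N lo (by omega)]
      · unfold pvSumD
        rw [PySem.List.pyRange_one_eq_nil (by omega : hi + 1 ≤ lo)]
        simp

-- ===== VERDICT (by name: the statement is the Claim_ definition above) =====
theorem diagonal_diff_spec : Claim_equal_diagonal_diff := by
  intro matrix _ _
  unfold Spec_diagonal_diff diagonal_diff diagonal_diff_alt
  simp only []
  rw [pvA_result]
  rw [pvWhileB_sum matrix ((matrix.length : Int) - 1)
        (((matrix.length : Int) - 1) - 0).toNat 0 ((matrix.length : Int) - 1) 0 rfl (by ring)]
  simp
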